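-- pv_equiv track=rewrite | github.com/micopes/Algorithm | 알고리즘 - 파이썬/백준(acmicpc.net)/기타/14582.py | solve
-- ===== SOURCE A (Python) =====
-- def solve(ulim, start):
--     uT = 0
--     sT = 0
--     for i in range(9):
--         uT += ulim[i]
--         if uT > sT:
--             return "Yes"
--         sT += start[i]
--
--     return "No"
-- ===== SOURCE B (Python) =====
-- def solve(ulim, start):
--     # Reduce to a max-prefix-sum problem on the inning deltas
--     # delta[0] = ulim[0], delta[k] = ulim[k] - start[k-1] (zip truncates naturally),
--     # and solve it by divide and conquer instead of a sequential scan.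
--     deltas = list(ulim[:1]) + [u - s for u, s in zip(ulim[1:9], start)]
--     if not deltas:
--         return "No"
--
--     def mps(lo, hi):
--         # (sum, max prefix sum) of deltas[lo:hi], hi > lo
--         if hi - lo == 1:
--             d = deltas[lo]
--             return d, d
--         mid = (lo + hi) // 2
--         s1, m1 = mps(lo, mid)
--         s2, m2 = mps(mid, hi)
--         return s1 + s2, max(m1, s1 + m2)
--
--     return "Yes" if mps(0, len(deltas))[1] > 0 else "No"
-- ===== Notes on version B (the rewrite author's own statement) =====
-- stated objective: alternative
-- what changed: B reduces the question to whether the max prefix sum of the inning-delta sequence (ulim[0], then ulim[k]-start[k-1]) is positive and computes that maximum by divide-and-conquer, instead of A's sequential interleaved running-sum loop with early return.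
import Mathlib
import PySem

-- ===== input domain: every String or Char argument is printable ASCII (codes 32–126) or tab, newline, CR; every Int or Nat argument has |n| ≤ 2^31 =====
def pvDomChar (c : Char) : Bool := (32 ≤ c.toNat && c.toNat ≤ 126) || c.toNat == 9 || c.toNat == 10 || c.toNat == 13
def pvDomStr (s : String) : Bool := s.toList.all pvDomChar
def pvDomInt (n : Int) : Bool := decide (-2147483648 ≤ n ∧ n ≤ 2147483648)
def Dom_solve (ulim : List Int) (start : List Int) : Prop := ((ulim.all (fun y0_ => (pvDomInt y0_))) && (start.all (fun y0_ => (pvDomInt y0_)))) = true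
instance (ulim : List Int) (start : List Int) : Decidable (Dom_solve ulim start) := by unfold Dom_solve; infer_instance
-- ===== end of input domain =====

-- B reformulates the test as "is the max prefix sum of the inning-delta sequence positive?"
-- and computes that maximum by divide-and-conquer ("alternative": different algorithm, same cost).

-- ===== PORT A =====
-- for i in range(9): uT += ulim[i]; if uT > sT: return "Yes"; sT += start[i]
-- pyGet? = none is Python's IndexError; those inputs are excluded by Pre_solve, "" is the junk value there.
def solveAux (ulim start : List Int) : Nat → Nat → Int → Int → String
  | _, 0, _, _ => "No"
  | i, fuel+1, uT, sT =>
    match PySem.List.pyGet? ulim ((i : Int)) with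
    | none => ""
    | some u =>
      if uT + u > sT then "Yes"
      else
        match PySem.List.pyGet? start ((i : Int)) with
        | none => ""
        | some s => solveAux ulim start (i+1) fuel (uT + u) (sT + s)

def solve (ulim : List Int) (start : List Int) : String := solveAux ulim start 0 9 0 0

-- ===== PORT B =====
-- def mps(lo, hi): (sum, max prefix sum) of deltas[lo:hi] by divide and conquer.
-- The in-range index access deltas[lo] is ported with pyGet? ((0,0) for the unreachable
-- IndexError case); the final 'else' arm totalises the empty range, on which the Python
-- helper is never invoked.
def mpsAux (deltas : List Int) (lo hi : Nat) : Int × Int :=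
  if hi - lo = 1 then
    match PySem.List.pyGet? deltas ((lo : Nat) : Int) with
    | some d => (d, d)
    | none => (0, 0)
  else if _h : lo < hi then
    let mid := (lo + hi) / 2
    let p1 := mpsAux deltas lo mid
    let p2 := mpsAux deltas mid hi
    (p1.1 + p2.1, max p1.2 (p1.1 + p2.2))
  else (0, 0)
termination_by hi - lo
decreasing_by all_goals omega

-- deltas = list(ulim[:1]) + [u - s for u, s in zip(ulim[1:9], start)]
def solve_alt (ulim : List Int) (start : List Int) : String :=
  let deltas := PySem.List.slice ulim none (some 1) ++
    List.zipWith (fun u s => u - s) (PySem.List.slice ulim (some 1) (some 9)) start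
  if deltas = [] then "No"
  else if (mpsAux deltas 0 deltas.length).2 > 0 then "Yes" else "No"

-- ===== PRECONDITION & SPEC =====
-- Pre_ is exactly where A returns (and excludes only IndexError): either both lists have ≥ 9
-- entries, or the upper team takes the lead at some step k reached before either list runs out.
def Pre_solve (ulim : List Int) (start : List Int) : Prop :=
  (9 ≤ ulim.length ∧ 9 ≤ start.length) ∨
  (∃ k, k < 9 ∧ k < ulim.length ∧ k ≤ start.length ∧
    (start.take k).sum < (ulim.take (k+1)).sum)
instance (ulim : List Int) (start : List Int) : Decidable (Pre_solve ulim start) := by unfold Pre_solve; infer_instance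

def pvWitness_solve : List Int × List Int := ([1,2,3,4,5,6,7,8,9], [9,8,7,6,5,4,3,2,1])

def Spec_solve (ulim : List Int) (start : List Int) (out : String) : Prop := out = solve_alt ulim start
instance (ulim : List Int) (start : List Int) (out : String) : Decidable (Spec_solve ulim start out) := by unfold Spec_solve; infer_instance

-- ===== CLAIM (what is proved, stated in full; the proofs are below) =====
def Claim_equal_solve : Prop := ∀ (ulim : List Int) (start : List Int), Dom_solve ulim start → Pre_solve ulim start → Spec_solve ulim start (solve ulim start)

-- ===== LEMMAS AND PROOFS =====

-- A-side: the loop returns "Yes" iff the lead condition holds at some reachable step.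
theorem solveAux_yes (ulim start : List Int) :
    ∀ fuel i, i + fuel = 9 →
    (∃ k, i ≤ k ∧ k < 9 ∧ k < ulim.length ∧ k ≤ start.length ∧
      (start.take k).sum < (ulim.take (k+1)).sum) →
    solveAux ulim start i fuel ((ulim.take i).sum) ((start.take i).sum) = "Yes" := by
  intro fuel
  induction fuel with
  | zero =>
    intro i hi ⟨k, hik, hk9, _, _, _⟩
    omega
  | succ fuel ih =>
    intro i hi ⟨k, hik, hk9, hku, hks, hsum⟩
    have hiu : i < ulim.length := Nat.lt_of_le_of_lt hik hku
    have hgu : PySem.List.pyGet? ulim ((i : Int)) = some ulim[i] := by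
      simp [PySem.List.pyGet?_natCast, List.getElem?_eq_getElem hiu]
    have hsucc : (ulim.take i).sum + ulim[i] = (ulim.take (i+1)).sum :=
      (List.sum_take_succ ulim i hiu).symm
    by_cases hcmp : (start.take i).sum < (ulim.take i).sum + ulim[i]
    · simp [solveAux, hgu, hcmp]
    · have hik' : i ≠ k := by
        intro e
        subst e
        exact hcmp (hsucc ▸ hsum)
      have hilt : i < k := Nat.lt_of_le_of_ne hik hik'
      have his : i < start.length := Nat.lt_of_lt_of_le hilt hks
      have hgs : PySem.List.pyGet? start ((i : Int)) = some start[i] := by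
        simp [PySem.List.pyGet?_natCast, List.getElem?_eq_getElem his]
      have := ih (i+1) (by omega) ⟨k, by omega, hk9, hku, hks, hsum⟩
      rw [List.sum_take_succ ulim i hiu, List.sum_take_succ start i his] at this
      simp [solveAux, hgu, hcmp, hgs, this]

theorem solveAux_no (ulim start : List Int) (hu : 9 ≤ ulim.length) (hs : 9 ≤ start.length) :
    ∀ fuel i, i + fuel = 9 →
    (∀ k, i ≤ k → k < 9 → ¬ ((start.take k).sum < (ulim.take (k+1)).sum)) →
    solveAux ulim start i fuel ((ulim.take i).sum) ((start.take i).sum) = "No" := by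
  intro fuel
  induction fuel with
  | zero => intro i _ _; simp [solveAux]
  | succ fuel ih =>
    intro i hi hno
    have hiu : i < ulim.length := by omega
    have his : i < start.length := by omega
    have hgu : PySem.List.pyGet? ulim ((i : Int)) = some ulim[i] := by
      simp [PySem.List.pyGet?_natCast, List.getElem?_eq_getElem hiu]
    have hgs : PySem.List.pyGet? start ((i : Int)) = some start[i] := by
      simp [PySem.List.pyGet?_natCast, List.getElem?_eq_getElem his]
    have hcmp : ¬ ((start.take i).sum < (ulim.take i).sum + ulim[i]) := by
      have := hno i (le_refl i) (by omega)
      rwa [List.sum_take_succ ulim i hiu] at this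
    have := ih (i+1) (by omega) (fun k hk hk9 => hno k (by omega) hk9)
    rw [List.sum_take_succ ulim i hiu, List.sum_take_succ start i his] at this
    simp [solveAux, hgu, hcmp, hgs, this]

-- B-side: mpsAux computes the range sum and the maximum prefix sum of deltas[lo:hi].
theorem mpsAux_spec (deltas : List Int) :
    ∀ n lo hi, lo < hi → hi ≤ deltas.length → hi - lo ≤ n →
    (mpsAux deltas lo hi).1 = (deltas.take hi).sum - (deltas.take lo).sum ∧
    (∃ j, lo < j ∧ j ≤ hi ∧ (mpsAux deltas lo hi).2 = (deltas.take j).sum - (deltas.take lo).sum) ∧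
    (∀ j, lo < j → j ≤ hi → (deltas.take j).sum - (deltas.take lo).sum ≤ (mpsAux deltas lo hi).2) := by
  intro n
  induction n with
  | zero => intro lo hi h1 _ h3; omega
  | succ n ih =>
    intro lo hi h1 h2 h3
    by_cases hbase : hi - lo = 1
    · have hhi : hi = lo + 1 := by omega
      have hlt : lo < deltas.length := by omega
      have hg : PySem.List.pyGet? deltas ((lo : Nat) : Int) = some deltas[lo] := by
        simp [PySem.List.pyGet?_natCast, List.getElem?_eq_getElem hlt]
      have hval : mpsAux deltas lo hi = (deltas[lo], deltas[lo]) := by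
        rw [mpsAux, if_pos hbase, hg]
      have hsum : (deltas.take (lo+1)).sum - (deltas.take lo).sum = deltas[lo] := by
        rw [List.sum_take_succ deltas lo hlt]; ring
      subst hhi
      refine ⟨by rw [hval, hsum], ⟨lo+1, by omega, le_refl _, by rw [hval, hsum]⟩, ?_⟩
      intro j hj1 hj2
      have : j = lo + 1 := by omega
      subst this
      rw [hval, hsum]
    · have hge : 2 ≤ hi - lo := by omega
      set mid := (lo + hi) / 2 with hmid
      have hm1 : lo < mid := by omega
      have hm2 : mid < hi := by omega
      have hval : mpsAux deltas lo hi =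
          ((mpsAux deltas lo mid).1 + (mpsAux deltas mid hi).1,
           max (mpsAux deltas lo mid).2 ((mpsAux deltas lo mid).1 + (mpsAux deltas mid hi).2)) := by
        rw [mpsAux, if_neg hbase, dif_pos h1]
      obtain ⟨hs1, ⟨j1, hj1a, hj1b, hj1e⟩, hb1⟩ := ih lo mid hm1 (by omega) (by omega)
      obtain ⟨hs2, ⟨j2, hj2a, hj2b, hj2e⟩, hb2⟩ := ih mid hi hm2 h2 (by omega)
      refine ⟨by rw [hval]; simp; rw [hs1, hs2]; ring, ?_, ?_⟩
      · by_cases hc : (mpsAux deltas lo mid).1 + (mpsAux deltas mid hi).2 ≤ (mpsAux deltas lo mid).2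
        · exact ⟨j1, hj1a, by omega, by rw [hval]; simp [max_eq_left hc]; exact hj1e⟩
        · refine ⟨j2, by omega, hj2b, ?_⟩
          rw [hval]
          simp [max_eq_right (le_of_lt (lt_of_not_ge hc))]
          rw [hs1, hj2e]; ring
      · intro j hja hjb
        rw [hval]
        dsimp only
        by_cases hcmid : j ≤ mid
        · exact le_max_of_le_left (hb1 j hja hcmid)
        · refine le_max_of_le_right ?_
          have := hb2 j (by omega) hjb
          rw [hs1]
          omega

-- The delta list and its prefix sums.
theorem zipSub_take_sum :
    ∀ (j : Nat) (as bs : List Int), j ≤ as.length → j ≤ bs.length →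
    ((List.zipWith (fun u s => u - s) as bs).take j).sum = (as.take j).sum - (bs.take j).sum := by
  intro j
  induction j with
  | zero => intro as bs _ _; simp
  | succ j ih =>
    intro as bs ha hb
    cases as with
    | nil => simp at ha
    | cons a as =>
      cases bs with
      | nil => simp at hb
      | cons b bs =>
        simp only [List.zipWith_cons_cons, List.take_succ_cons, List.sum_cons]
        rw [ih as bs (by simpa using ha) (by simpa using hb)]
        ring

theorem deltas_cons (u : Int) (us start : List Int) :
    PySem.List.slice (u::us) none (some 1) ++
      List.zipWith (fun u s => u - s) (PySem.List.slice (u::us) (some 1) (some 9)) start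
    = u :: List.zipWith (fun u s => u - s) (us.take 8) start := by
  rw [PySem.List.slice_to (u::us) (by norm_num),
      PySem.List.slice_toNat (u::us) (by norm_num : (0:Int) ≤ 1) (by norm_num : (0:Int) ≤ 9)]
  norm_num
  rfl

theorem deltas_take_sum (u : Int) (us start : List Int) (k : Nat)
    (hk : k ≤ (List.zipWith (fun u s => u - s) (us.take 8) start).length) :
    ((u :: List.zipWith (fun u s => u - s) (us.take 8) start).take (k+1)).sum
      = ((u::us).take (k+1)).sum - (start.take k).sum := by
  have hk' : k ≤ min (us.take 8).length start.length := by simpa using hk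
  have h8 : k ≤ 8 := by simp at hk'; omega
  have hus : k ≤ us.length := by simp at hk'; omega
  have hst : k ≤ start.length := by simp at hk'; omega
  simp only [List.take_succ_cons, List.sum_cons]
  rw [zipSub_take_sum k (us.take 8) start (by simp; omega) hst]
  rw [List.take_take, Nat.min_eq_left h8]
  ring

-- ===== VERDICT (by name: the statement is the Claim_ definition above) =====
theorem solve_spec : Claim_equal_solve := by
  intro ulim start _ hpre
  show solve ulim start = solve_alt ulim start
  by_cases hex : ∃ k, k < 9 ∧ k < ulim.length ∧ k ≤ start.length ∧
      (start.take k).sum < (ulim.take (k+1)).sum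
  · obtain ⟨k, hk9, hku, hks, hsum⟩ := hex
    have ha := solveAux_yes ulim start 9 0 rfl ⟨k, Nat.zero_le k, hk9, hku, hks, hsum⟩
    simp at ha
    cases ulim with
    | nil => simp at hku
    | cons u us =>
      set z := List.zipWith (fun u s => u - s) (us.take 8) start with hz
      have hkz : k ≤ z.length := by
        simp [hz]
        constructor
        · omega
        · constructor
          · simp at hku; omega
          · exact hks
      obtain ⟨_, _, hb⟩ := mpsAux_spec (u :: z) (u :: z).length 0 (u :: z).length
        (by simp) (le_refl _) (by omega)
      have hbound := hb (k+1) (by omega) (by simp; omega)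
      rw [deltas_take_sum u us start k hkz] at hbound
      simp only [List.take_zero, List.sum_nil, sub_zero] at hbound
      have hm : 0 < (mpsAux (u :: z) 0 (u :: z).length).2 := by omega
      simp only [solve_alt, solve, deltas_cons]
      rw [if_neg (by simp), if_pos hm]
      simpa [solve] using ha
  · have hlen : 9 ≤ ulim.length ∧ 9 ≤ start.length := by
      rcases hpre with h | ⟨k, hk9, hku, hks, hsum⟩
      · exact h
      · exact absurd ⟨k, hk9, hku, hks, hsum⟩ hex
    push Not at hex
    have hno : ∀ k, k < 9 → ¬ ((start.take k).sum < (ulim.take (k+1)).sum) := by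
      intro k hk9 h
      exact absurd h (not_lt.mpr (hex k hk9 (by omega) (by omega)))
    have ha := solveAux_no ulim start hlen.1 hlen.2 9 0 rfl (fun k _ hk9 => hno k hk9)
    simp at ha
    cases ulim with
    | nil => simp at hlen
    | cons u us =>
      set z := List.zipWith (fun u s => u - s) (us.take 8) start with hz
      have hus : 8 ≤ us.length := by have := hlen.1; simp at this; omega
      have hzlen : z.length = 8 := by
        simp [hz]
        omega
      obtain ⟨_, ⟨j, hj0, hjn, hje⟩, _⟩ := mpsAux_spec (u :: z) (u :: z).length 0 (u :: z).length
        (by simp) (le_refl _) (by omega)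
      have hjlen : j ≤ 9 := by simp [hzlen] at hjn; omega
      obtain ⟨k, rfl⟩ : ∃ k, j = k + 1 := ⟨j - 1, by omega⟩
      have hkz : k ≤ z.length := by omega
      rw [deltas_take_sum u us start k hkz] at hje
      simp only [List.take_zero, List.sum_nil, sub_zero] at hje
      have hm : ¬ (0 < (mpsAux (u :: z) 0 (u :: z).length).2) := by
        have := hno k (by omega)
        omega
      simp only [solve_alt, solve, deltas_cons]
      rw [if_neg (by simp), if_neg hm]
      simpa [solve] using ha
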